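-- pv_equiv track=rewrite | github.com/vsevolodanhelis/Password-Strength-Evaluation-Tool | password_tool/patterns.py | detect_sequential
-- ===== SOURCE A (Python) =====
-- _ASCII_LOWER = frozenset("abcdefghijklmnopqrstuvwxyz")
--
-- _ASCII_UPPER = frozenset("ABCDEFGHIJKLMNOPQRSTUVWXYZ")
--
-- _ASCII_DIGIT = frozenset("0123456789")
--
-- def detect_sequential(password: str, min_run: int = 3) -> bool:
--     """
--     Return True if *password* contains *min_run* or more characters that
--     form a consecutive ascending or descending sequence.
--
--     Only considers ASCII alphanumerics to avoid false positives on Unicode.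
--     """
--     if len(password) < min_run:
--         return False
--
--     filtered = [c for c in password
--                 if c in _ASCII_LOWER or c in _ASCII_UPPER or c in _ASCII_DIGIT]
--
--     asc_run = 1
--     desc_run = 1
--     for i in range(1, len(filtered)):
--         diff = ord(filtered[i]) - ord(filtered[i - 1])
--         if diff == 1:
--             asc_run += 1
--             if asc_run >= min_run:
--                 return True
--         else:
--             asc_run = 1
--         if diff == -1:
--             desc_run += 1
--             if desc_run >= min_run:
--                 return True
--         else:
--             desc_run = 1
--
--     return False
-- ===== SOURCE B (Python) =====
-- _LOWER = "abcdefghijklmnopqrstuvwxyz"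
-- _UPPER = "ABCDEFGHIJKLMNOPQRSTUVWXYZ"
-- _DIGITS = "0123456789"
--
-- def detect_sequential(password: str, min_run: int = 3) -> bool:
--     if len(password) < min_run:
--         return False
--     ords = [ord(c) for c in password
--             if c in _LOWER or c in _UPPER or c in _DIGITS]
--     diffs = [b - a for a, b in zip(ords, ords[1:])]
--     # run-length encode the step values: maximal runs of equal diffs
--     runs = []
--     for d in diffs:
--         if runs and runs[-1][0] == d:
--             runs[-1] = (d, runs[-1][1] + 1)
--         else:
--             runs.append((d, 1))
--     need = max(min_run - 1, 1)
--     # a run of k equal +/-1 steps spans k+1 characters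
--     return any(d in (1, -1) and n >= need for d, n in runs)
-- ===== Notes on version B (the rewrite author's own statement) =====
-- stated objective: alternative
-- what changed: Replaces A's stateful scan with two running asc/desc counters and early returns by computing the list of adjacent ordinal differences, run-length encoding it into maximal runs of equal step values, and returning whether any run of step +1 or -1 has at least max(min_run-1,1) steps.
import Mathlib
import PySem

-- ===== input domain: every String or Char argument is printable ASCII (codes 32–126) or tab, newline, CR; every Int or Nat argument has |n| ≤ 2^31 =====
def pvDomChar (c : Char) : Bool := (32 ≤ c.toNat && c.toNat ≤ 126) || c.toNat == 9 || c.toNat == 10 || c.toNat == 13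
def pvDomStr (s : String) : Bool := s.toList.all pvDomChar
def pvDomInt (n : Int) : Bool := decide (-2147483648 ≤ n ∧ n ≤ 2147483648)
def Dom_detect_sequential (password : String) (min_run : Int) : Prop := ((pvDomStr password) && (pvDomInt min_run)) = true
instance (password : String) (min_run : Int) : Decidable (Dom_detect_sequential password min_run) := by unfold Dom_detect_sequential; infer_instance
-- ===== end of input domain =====

-- B replaces A's stateful two-counter scan with adjacent ordinal differences, run-length
-- encoding of the step values, and an `any` over the runs (objective: alternative, same cost).

-- ===== PORT A =====
-- the three frozenset membership tests of A (shared constant character classes)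
def pvIsAlnum (c : Char) : Bool :=
  ("abcdefghijklmnopqrstuvwxyz".toList.contains c) ||
  ("ABCDEFGHIJKLMNOPQRSTUVWXYZ".toList.contains c) ||
  ("0123456789".toList.contains c)

-- A's `for i in range(1, len(filtered))` loop: prev = filtered[i-1], early returns as `if … then true`
def pvLoopA (min_run : Int) : Char → Int → Int → List Char → Bool
  | _, _, _, [] => false
  | prev, asc, desc, c :: rest =>
    let diff : Int := (c.toNat : Int) - (prev.toNat : Int)
    let asc' := if diff = 1 then asc + 1 else (1 : Int)
    if diff = 1 ∧ min_run ≤ asc' then true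
    else
      let desc' := if diff = -1 then desc + 1 else (1 : Int)
      if diff = -1 ∧ min_run ≤ desc' then true
      else pvLoopA min_run c asc' desc' rest

def detect_sequential (password : String) (min_run : Int) : Bool :=
  if PySem.Str.len password < min_run then false
  else
    match password.toList.filter pvIsAlnum with
    | [] => false
    | c :: rest => pvLoopA min_run c 1 1 rest

-- ===== PORT B =====
-- Source B's run-length-encoding loop: appends at the end / bumps the last pair; ported as a fold
-- that keeps the run list in reverse (head = last pair) and reverses once at the end (exact).
def pvRuns (diffs : List Int) : List (Int × Int) :=
  (diffs.foldl (fun runs d =>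
    match runs with
    | (d', n) :: rest => if d' = d then (d', n + 1) :: rest else (d, 1) :: (d', n) :: rest
    | [] => [(d, 1)]) []).reverse

def detect_sequential_alt (password : String) (min_run : Int) : Bool :=
  if PySem.Str.len password < min_run then false
  else
    let ords := (password.toList.filter pvIsAlnum).map (fun c => (c.toNat : Int))
    let diffs := (ords.zip ords.tail).map (fun p => p.2 - p.1)
    let need := max (min_run - 1) 1
    (pvRuns diffs).any (fun p => (p.1 == 1 || p.1 == -1) && decide (need ≤ p.2))

-- ===== PRECONDITION & SPEC =====
def Spec_detect_sequential (password : String) (min_run : Int) (out : Bool) : Prop := out = detect_sequential_alt password min_run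
instance (password : String) (min_run : Int) (out : Bool) : Decidable (Spec_detect_sequential password min_run out) := by unfold Spec_detect_sequential; infer_instance

-- ===== CLAIM (what is proved, stated in full; the proofs are below) =====
def Claim_equal_detect_sequential : Prop := ∀ (password : String) (min_run : Int), Dom_detect_sequential password min_run → Spec_detect_sequential password min_run (detect_sequential password min_run)

-- ===== LEMMAS AND PROOFS =====

-- adjacent differences of a list
def pvDiffs (f : List Int) : List Int := (f.zip f.tail).map (fun p => p.2 - p.1)

-- maximal-run grouping, stated recursively (proof-side mirror of pvRuns)
def pvGroups : List Int → List (Int × Int)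
  | [] => []
  | d :: ds => (d, 1 + ((ds.takeWhile (· == d)).length : Int)) :: pvGroups (ds.dropWhile (· == d))
termination_by l => l.length
decreasing_by
  simp only [List.length_cons]
  exact Nat.lt_succ_of_le (List.length_dropWhile_le _ _)

-- A's loop rephrased on the diff list (proof-side mirror of pvLoopA)
def pvLoopD (min_run : Int) : Int → Int → List Int → Bool
  | _, _, [] => false
  | asc, desc, d :: ds =>
    let asc' := if d = 1 then asc + 1 else (1 : Int)
    if d = 1 ∧ min_run ≤ asc' then true
    else
      let desc' := if d = -1 then desc + 1 else (1 : Int)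
      if d = -1 ∧ min_run ≤ desc' then true
      else pvLoopD min_run asc' desc' ds

theorem pvLoopA_eq_loopD (min_run : Int) :
    ∀ (rest : List Char) (prev : Char) (asc desc : Int),
      pvLoopA min_run prev asc desc rest =
        pvLoopD min_run asc desc (pvDiffs ((prev :: rest).map (fun c => (c.toNat : Int)))) := by
  intro rest
  induction rest with
  | nil => intro prev asc desc; simp [pvLoopA, pvLoopD, pvDiffs]
  | cons c rest ih =>
    intro prev asc desc
    have hih := ih c (if ((c.toNat : Int) - (prev.toNat : Int)) = 1 then asc + 1 else 1)
      (if ((c.toNat : Int) - (prev.toNat : Int)) = -1 then desc + 1 else 1)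
    simp only [pvDiffs, List.map_cons, List.tail_cons, List.zip_cons_cons] at hih ⊢
    simp only [pvLoopA, pvLoopD]
    rw [hih]

theorem pvRuns_aux (ds : List Int) :
    ∀ (d : Int) (n : Int) (acc : List (Int × Int)),
      ((ds.foldl (fun runs e =>
        match runs with
        | (d', m) :: rest => if d' = e then (d', m + 1) :: rest else (e, 1) :: (d', m) :: rest
        | [] => [(e, 1)]) ((d, n) :: acc)).reverse)
      = acc.reverse ++ (d, n + ((ds.takeWhile (· == d)).length : Int)) :: pvGroups (ds.dropWhile (· == d)) := by
  induction ds with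
  | nil => intro d n acc; simp [pvGroups]
  | cons e ds ih =>
    intro d n acc
    by_cases h : d = e
    · subst h
      simp only [List.foldl_cons, reduceIte]
      rw [ih d (n + 1) acc]
      simp [List.takeWhile, List.dropWhile]
      ring_nf
    · simp only [List.foldl_cons, if_neg h]
      rw [ih e 1 ((d, n) :: acc)]
      have he : (e == d) = false := by simp [Ne.symm h]
      simp [List.takeWhile, List.dropWhile, he, pvGroups]

theorem pvRuns_eq_groups (ds : List Int) : pvRuns ds = pvGroups ds := by
  cases ds with
  | nil => simp [pvRuns, pvGroups]
  | cons d ds =>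
    simp only [pvRuns, List.foldl_cons]
    have := pvRuns_aux ds d 1 []
    simpa [pvGroups] using this

-- the value of pvLoopD on a nonempty list does not depend on asc when the head is ≠ 1,
-- nor on desc when the head is ≠ -1
theorem pvLoopD_asc_irrel (mr b : Int) {d : Int} (h : d ≠ 1) (ds : List Int) (a a' : Int) :
    pvLoopD mr a b (d :: ds) = pvLoopD mr a' b (d :: ds) := by
  simp [pvLoopD, h]

theorem pvLoopD_desc_irrel (mr a : Int) {d : Int} (h : d ≠ -1) (ds : List Int) (b b' : Int) :
    pvLoopD mr a b (d :: ds) = pvLoopD mr a b' (d :: ds) := by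
  simp [pvLoopD, h]

theorem pvRun_one (mr : Int) :
    ∀ (m : Nat) (ds : List Int) (asc : Int), ds.head? ≠ some 1 →
      pvLoopD mr asc 1 (List.replicate m 1 ++ ds)
        = (((decide (1 ≤ m)) && decide (mr ≤ asc + m)) || pvLoopD mr 1 1 ds) := by
  intro m
  induction m with
  | zero =>
    intro ds asc h
    have hz : ((decide ((1:Nat) ≤ 0)) && decide (mr ≤ asc + ((0:Nat):Int))) = false := by simp
    rw [List.replicate_zero, List.nil_append, hz, Bool.false_or]
    cases ds with
    | nil => simp [pvLoopD]
    | cons d ds =>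
      have hd : d ≠ 1 := by intro he; apply h; simp [he]
      exact pvLoopD_asc_irrel mr 1 hd ds asc 1
  | succ m ih =>
    intro ds asc h
    rw [List.replicate_succ, List.cons_append]
    rw [show pvLoopD mr asc 1 ((1:Int) :: (List.replicate m 1 ++ ds))
        = (if mr ≤ asc + 1 then true else pvLoopD mr (asc + 1) 1 (List.replicate m 1 ++ ds)) from by
      simp [pvLoopD]]
    rw [ih ds (asc + 1) h]
    by_cases hc : mr ≤ asc + 1
    · rw [if_pos hc]
      have h2 : ((decide (1 ≤ m + 1)) && decide (mr ≤ asc + ((m + 1 : Nat) : Int))) = true := by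
        simp only [Bool.and_eq_true, decide_eq_true_eq]
        refine ⟨by omega, ?_⟩
        push_cast
        omega
      rw [h2, Bool.true_or]
    · rw [if_neg hc]
      congr 1
      rcases Nat.eq_zero_or_pos m with hm | hm
      · subst hm
        have ea : (decide ((1:Nat) ≤ 0)) = false := by decide
        have eb : decide (mr ≤ asc + ((0 + 1 : Nat) : Int)) = false := by
          simp only [decide_eq_false_iff_not]
          push_cast
          omega
        rw [ea, eb, Bool.false_and, Bool.and_false]
      · have e1 : (decide (1 ≤ m)) = true := by simpa using hm
        have e2 : (decide (1 ≤ m + 1)) = true := by simp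
        rw [e1, e2, Bool.true_and, Bool.true_and, decide_eq_decide]
        push_cast
        omega

theorem pvRun_negone (mr : Int) :
    ∀ (m : Nat) (ds : List Int) (desc : Int), ds.head? ≠ some (-1) →
      pvLoopD mr 1 desc (List.replicate m (-1) ++ ds)
        = (((decide (1 ≤ m)) && decide (mr ≤ desc + m)) || pvLoopD mr 1 1 ds) := by
  intro m
  induction m with
  | zero =>
    intro ds desc h
    have hz : ((decide ((1:Nat) ≤ 0)) && decide (mr ≤ desc + ((0:Nat):Int))) = false := by simp
    rw [List.replicate_zero, List.nil_append, hz, Bool.false_or]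
    cases ds with
    | nil => simp [pvLoopD]
    | cons d ds =>
      have hd : d ≠ -1 := by intro he; apply h; simp [he]
      exact pvLoopD_desc_irrel mr 1 hd ds desc 1
  | succ m ih =>
    intro ds desc h
    rw [List.replicate_succ, List.cons_append]
    rw [show pvLoopD mr 1 desc ((-1 : Int) :: (List.replicate m (-1) ++ ds))
        = (if mr ≤ desc + 1 then true else pvLoopD mr 1 (desc + 1) (List.replicate m (-1) ++ ds)) from by
      simp [pvLoopD]]
    rw [ih ds (desc + 1) h]
    by_cases hc : mr ≤ desc + 1
    · rw [if_pos hc]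
      have h2 : ((decide (1 ≤ m + 1)) && decide (mr ≤ desc + ((m + 1 : Nat) : Int))) = true := by
        simp only [Bool.and_eq_true, decide_eq_true_eq]
        refine ⟨by omega, ?_⟩
        push_cast
        omega
      rw [h2, Bool.true_or]
    · rw [if_neg hc]
      congr 1
      rcases Nat.eq_zero_or_pos m with hm | hm
      · subst hm
        have ea : (decide ((1:Nat) ≤ 0)) = false := by decide
        have eb : decide (mr ≤ desc + ((0 + 1 : Nat) : Int)) = false := by
          simp only [decide_eq_false_iff_not]
          push_cast
          omega
        rw [ea, eb, Bool.false_and, Bool.and_false]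
      · have e1 : (decide (1 ≤ m)) = true := by simpa using hm
        have e2 : (decide (1 ≤ m + 1)) = true := by simp
        rw [e1, e2, Bool.true_and, Bool.true_and, decide_eq_decide]
        push_cast
        omega

theorem pvRun_other (mr : Int) {d : Int} (h1 : d ≠ 1) (h2 : d ≠ -1) :
    ∀ (m : Nat) (ds : List Int) (asc desc : Int),
      pvLoopD mr asc desc (List.replicate (m + 1) d ++ ds) = pvLoopD mr 1 1 ds := by
  intro m
  induction m with
  | zero =>
    intro ds asc desc
    simp [pvLoopD, h1, h2]
  | succ m ih =>
    intro ds asc desc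
    rw [List.replicate_succ, List.cons_append]
    rw [show pvLoopD mr asc desc (d :: (List.replicate (m + 1) d ++ ds))
        = pvLoopD mr 1 1 (List.replicate (m + 1) d ++ ds) from by
      simp [pvLoopD, h1, h2]]
    exact ih ds 1 1

theorem pvTakeWhile_replicate {d : Int} (ds : List Int) :
    ds.takeWhile (· == d) = List.replicate (ds.takeWhile (· == d)).length d := by
  rw [List.eq_replicate_iff]
  refine ⟨rfl, fun b hb => ?_⟩
  have := List.mem_takeWhile_imp hb
  simpa using this

theorem pvLoopD_eq_groups (mr : Int) :
    ∀ (n : Nat) (ds : List Int), ds.length ≤ n →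
      pvLoopD mr 1 1 ds
        = (pvGroups ds).any (fun p => (p.1 == 1 || p.1 == -1) && decide (max (mr - 1) 1 ≤ p.2)) := by
  intro n
  induction n with
  | zero =>
    intro ds h
    have : ds = [] := List.eq_nil_of_length_eq_zero (Nat.le_zero.mp h)
    subst this
    simp [pvLoopD, pvGroups]
  | succ n ih =>
    intro ds h
    cases ds with
    | nil => simp [pvLoopD, pvGroups]
    | cons d ds =>
      set t := ds.takeWhile (· == d) with ht
      set r := ds.dropWhile (· == d) with hr
      have hsplit : d :: ds = List.replicate (t.length + 1) d ++ r := by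
        rw [List.replicate_succ, List.cons_append]
        congr 1
        rw [← List.takeWhile_append_dropWhile (p := (· == d)) (l := ds), ← ht, ← hr]
        congr 1
        simpa using pvTakeWhile_replicate (d := d) ds
      have hrlen : r.length ≤ n := by
        have h1 : r.length ≤ ds.length := List.length_dropWhile_le _ _
        simp only [List.length_cons] at h
        omega
      have hhead : r.head? ≠ some d := by
        rw [hr]
        intro he
        have hne : ds.dropWhile (· == d) ≠ [] := by intro h0; simp [h0] at he
        have hnp := List.head_dropWhile_not (p := (· == d)) (l := ds) hne
        rw [List.head?_eq_some_head hne] at he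
        injection he with he'
        rw [he'] at hnp
        simp at hnp
      have hgroups : pvGroups (d :: ds) = (d, 1 + (t.length : Int)) :: pvGroups r := by
        rw [pvGroups]
      rw [hgroups, List.any_cons]
      by_cases hd1 : d = 1
      · subst hd1
        conv_lhs => rw [hsplit]
        rw [pvRun_one mr (t.length + 1) r 1 hhead, ih r hrlen]
        congr 1
        rw [show (((1:Int), 1 + (t.length:Int)).1) = (1:Int) from rfl,
            show (((1:Int), 1 + (t.length:Int)).2) = 1 + (t.length:Int) from rfl]
        have e1 : (decide (1 ≤ t.length + 1)) = true := by simp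
        have e2 : (((1:Int) == 1) || ((1:Int) == -1)) = true := by decide
        rw [e1, e2, Bool.true_and, Bool.true_and, decide_eq_decide]
        push_cast
        omega
      · by_cases hd2 : d = -1
        · subst hd2
          conv_lhs => rw [hsplit]
          rw [pvRun_negone mr (t.length + 1) r 1 hhead, ih r hrlen]
          congr 1
          rw [show (((-1:Int), 1 + (t.length:Int)).1) = (-1:Int) from rfl,
              show (((-1:Int), 1 + (t.length:Int)).2) = 1 + (t.length:Int) from rfl]
          have e1 : (decide (1 ≤ t.length + 1)) = true := by simp
          have e2 : (((-1:Int) == 1) || ((-1:Int) == -1)) = true := by decide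
          rw [e1, e2, Bool.true_and, Bool.true_and, decide_eq_decide]
          push_cast
          omega
        · conv_lhs => rw [hsplit]
          rw [pvRun_other mr hd1 hd2 t.length r 1 1, ih r hrlen]
          rw [show ((d, 1 + (t.length:Int)).1) = d from rfl]
          have e2 : ((d == 1) || (d == -1)) = false := by
            simp [hd1, hd2]
          rw [e2, Bool.false_and, Bool.false_or]

-- ===== VERDICT (by name: the statement is the Claim_ definition above) =====
theorem detect_sequential_spec : Claim_equal_detect_sequential := by
  intro password min_run _
  unfold Spec_detect_sequential detect_sequential detect_sequential_alt
  by_cases hg : PySem.Str.len password < min_run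
  · rw [if_pos hg, if_pos hg]
  · rw [if_neg hg, if_neg hg]
    cases hf : password.toList.filter pvIsAlnum with
    | nil => simp [pvRuns]
    | cons c rest =>
      change pvLoopA min_run c 1 1 rest = _
      rw [pvLoopA_eq_loopD min_run rest c 1 1]
      rw [pvLoopD_eq_groups min_run (pvDiffs ((c :: rest).map (fun ch => (ch.toNat : Int)))).length _ le_rfl]
      rw [← pvRuns_eq_groups]
      rfl
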